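-- pv_equiv track=rewrite | github.com/BenHawkCode/The-Coach-Consultant- | 1-meta-ads/meta-ads-daily-review/fetch_daily_review.py | extract_form_submits
-- ===== SOURCE A (Python) =====
-- def extract_form_submits(insights):
--     """Pull unique Meta pixel lead events from the 'actions' array.
--
--     Meta returns the same lead under multiple labels (`lead`,
--     `offsite_conversion.fb_pixel_lead`, `onsite_conversion.lead_grouped`).
--     Summing them triple-counts — that was the 2026-04-17 incident (36 vs
--     real 18). Take the max across the pixel-lead family; scheduled-call
--     events are counted separately via extract_meta_pixel_calls().
--
--     These are FORM SUBMISSIONS, not booked calls. Ground truth for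
--     bookings is tracked manually by Mahmoud.
--     """
--     by_type = {}
--     for a in insights.get("actions", []) or []:
--         try:
--             by_type[a.get("action_type")] = int(a.get("value", 0))
--         except (TypeError, ValueError):
--             continue
--     return max(
--         by_type.get("lead", 0),
--         by_type.get("offsite_conversion.fb_pixel_lead", 0),
--         by_type.get("onsite_conversion.lead_grouped", 0),
--     )
-- ===== SOURCE B (Python) =====
-- def get_action_value(insights, action_type):
--     """Last successfully-parsed int value among actions of the given type (0 if none)."""
--     val = 0
--     for a in insights.get("actions", []) or []:
--         if a.get("action_type") == action_type:
--             try: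
--                 val = int(a.get("value", 0))
--             except (TypeError, ValueError):
--                 continue
--     return val
--
--
-- def extract_form_submits(insights):
--     return max(
--         get_action_value(insights, "lead"),
--         get_action_value(insights, "offsite_conversion.fb_pixel_lead"),
--         get_action_value(insights, "onsite_conversion.lead_grouped"),
--     )
-- ===== Notes on version B (the rewrite author's own statement) =====
-- stated objective: alternative
-- what changed: Replaces the single pass that builds a by-action-type dict (then three lookups) with a helper that scans the actions list once per wanted action_type, keeping a running last-valid-value accumulator; no dict is built.
import Mathlib
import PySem

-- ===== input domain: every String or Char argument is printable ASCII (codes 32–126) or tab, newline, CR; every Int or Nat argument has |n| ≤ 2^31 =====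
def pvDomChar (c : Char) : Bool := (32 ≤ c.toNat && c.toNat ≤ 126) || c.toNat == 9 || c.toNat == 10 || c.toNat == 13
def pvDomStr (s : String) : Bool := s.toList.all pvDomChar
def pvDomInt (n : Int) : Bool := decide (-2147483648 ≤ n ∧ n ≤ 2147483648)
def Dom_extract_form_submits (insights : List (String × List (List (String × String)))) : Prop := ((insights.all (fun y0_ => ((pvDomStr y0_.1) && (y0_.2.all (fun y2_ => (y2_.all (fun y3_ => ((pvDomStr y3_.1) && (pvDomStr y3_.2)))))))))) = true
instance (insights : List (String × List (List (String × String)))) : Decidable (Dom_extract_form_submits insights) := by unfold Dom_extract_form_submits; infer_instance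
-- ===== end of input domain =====

-- B replaces A's dict-building pass (+ three lookups) with one last-valid-value scan of the actions
-- list per wanted action_type; a different decomposition of the same cost (objective: alternative).


-- ===== PORT A =====
-- int(a.get("value", 0)): missing key gives the int 0 (always parses); a present key is a string
-- parsed by Python's int() = PySem.Int.ofStr? (none = ValueError, the entry is skipped).
def pvParseValue (a : List (String × String)) : Option Int :=
  match a.lookup "value" with
  | none => some 0
  | some s => PySem.Int.ofStr? s

def extract_form_submits (insights : List (String × List (List (String × String)))) : Int :=
  let actions := (insights.lookup "actions").getD []
  let by_type : PySem.Dict (Option String) Int :=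
    actions.foldl (fun d a =>
      match pvParseValue a with
      | some v => d.insert (a.lookup "action_type") v
      | none => d) PySem.Dict.empty
  max (max (by_type.getD (some "lead") 0)
           (by_type.getD (some "offsite_conversion.fb_pixel_lead") 0))
      (by_type.getD (some "onsite_conversion.lead_grouped") 0)

-- ===== PORT B =====
def get_action_value (insights : List (String × List (List (String × String)))) (action_type : String) : Int :=
  ((insights.lookup "actions").getD []).foldl (fun val a =>
    if a.lookup "action_type" == some action_type then
      match pvParseValue a with
      | some v => v
      | none => val
    else val) 0

def extract_form_submits_alt (insights : List (String × List (List (String × String)))) : Int :=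
  max (max (get_action_value insights "lead")
           (get_action_value insights "offsite_conversion.fb_pixel_lead"))
      (get_action_value insights "onsite_conversion.lead_grouped")

-- ===== PRECONDITION & SPEC =====
def Spec_extract_form_submits (insights : List (String × List (List (String × String)))) (out : Int) : Prop := out = extract_form_submits_alt insights
instance (insights : List (String × List (List (String × String)))) (out : Int) : Decidable (Spec_extract_form_submits insights out) := by unfold Spec_extract_form_submits; infer_instance

-- ===== CLAIM (what is proved, stated in full; the proofs are below) =====
def Claim_equal_extract_form_submits : Prop := ∀ (insights : List (String × List (List (String × String)))), Dom_extract_form_submits insights → Spec_extract_form_submits insights (extract_form_submits insights)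

-- ===== LEMMAS AND PROOFS =====
-- A's dict lookup after the building pass equals B's per-key running fold.
theorem pv_fold_getD (actions : List (List (String × String))) (k : String)
    (d : PySem.Dict (Option String) Int) :
    (actions.foldl (fun d a =>
        match pvParseValue a with
        | some v => d.insert (a.lookup "action_type") v
        | none => d) d).getD (some k) 0
      = actions.foldl (fun val a =>
          if a.lookup "action_type" == some k then
            match pvParseValue a with
            | some v => v
            | none => val
          else val) (d.getD (some k) 0) := by
  induction actions generalizing d with
  | nil => simp
  | cons a rest ih =>
    simp only [List.foldl_cons]
    cases hp : pvParseValue a with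
    | none => simp [hp, ih]
    | some v =>
      simp only [hp]
      rw [ih]
      congr 1
      rw [PySem.Dict.getD_insert]
      by_cases h : a.lookup "action_type" = some k
      · simp [h]
      · simp [h]
        intro h'
        exact absurd h'.symm h

theorem extract_form_submits_eq (insights : List (String × List (List (String × String)))) :
    extract_form_submits insights = extract_form_submits_alt insights := by
  unfold extract_form_submits extract_form_submits_alt get_action_value
  simp only [pv_fold_getD, PySem.Dict.getD_empty]

-- ===== VERDICT (by name: the statement is the Claim_ definition above) =====
theorem extract_form_submits_spec : Claim_equal_extract_form_submits := by
  intro insights _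
  exact extract_form_submits_eq insights
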